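-- pv_equiv track=rewrite | github.com/twidddj/tokmangan | train.py | find_origin_id
-- ===== SOURCE A (Python) =====
-- def find_origin_id(p, seed_id):
--     cnt_present = 0
--     for origin_id, is_missing in enumerate(p):
--         is_presented = 1-is_missing
--         if is_presented:
--             if  cnt_present == seed_id:
--                 return origin_id
--             cnt_present += 1
--     return None
-- ===== SOURCE B (Python) =====
-- def find_origin_id(p, seed_id):
--     # Prefix-count table + binary search for the smallest j with pref[j+1] > seed_id.
--     if seed_id < 0:
--         return None
--     # pref[i] = number of present entries among p[:i] (presence test: 1 - m truthy)
--     pref = [0]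
--     for m in p:
--         pref.append(pref[-1] + (1 if 1 - m else 0))
--     if seed_id >= pref[-1]:
--         return None
--     lo, hi = 0, len(p) - 1
--     while lo < hi:
--         mid = (lo + hi) // 2
--         if pref[mid + 1] > seed_id:
--             hi = mid
--         else:
--             lo = mid + 1
--     return lo
-- ===== Notes on version B (the rewrite author's own statement) =====
-- stated objective: alternative
-- what changed: Replaces A's single counting early-return scan with a prefix-count table of present entries followed by a binary search for the smallest j with pref[j+1] > seed_id.
import Mathlib
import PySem

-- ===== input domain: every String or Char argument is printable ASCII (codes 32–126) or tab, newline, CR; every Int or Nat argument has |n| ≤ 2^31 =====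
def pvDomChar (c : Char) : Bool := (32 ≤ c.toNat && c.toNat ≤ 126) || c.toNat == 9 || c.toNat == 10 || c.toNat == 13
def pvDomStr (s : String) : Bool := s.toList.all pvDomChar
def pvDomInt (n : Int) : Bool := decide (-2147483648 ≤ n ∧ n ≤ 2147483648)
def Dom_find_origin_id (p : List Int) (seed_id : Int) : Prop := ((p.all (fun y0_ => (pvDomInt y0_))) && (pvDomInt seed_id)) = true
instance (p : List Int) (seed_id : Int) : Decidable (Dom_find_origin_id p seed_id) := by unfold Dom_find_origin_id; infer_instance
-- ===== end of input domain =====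

-- B replaces A's counting early-return scan by a prefix-count table of present entries
-- followed by a binary search for the smallest j with pref[j+1] > seed_id (objective: alternative).

-- ===== PORT A =====
-- loop over enumerate(p) carrying cnt_present
def find_origin_id_loop : List (Int × Int) → Int → Int → Option Int
  | [], _, _ => none
  | (origin_id, is_missing) :: rest, cnt_present, seed_id =>
    let is_presented := 1 - is_missing
    if is_presented ≠ 0 then
      if cnt_present = seed_id then some origin_id
      else find_origin_id_loop rest (cnt_present + 1) seed_id
    else find_origin_id_loop rest cnt_present seed_id

def find_origin_id (p : List Int) (seed_id : Int) : Option Int :=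
  find_origin_id_loop (PySem.List.enumerate p 0) 0 seed_id

-- ===== PORT B =====
-- midpoint bounds, cited by bsLoop's decreasing_by
theorem pv_mid_bounds {lo hi : Int} (h : lo < hi) :
    lo ≤ PySem.Int.floordiv (lo + hi) 2 ∧ PySem.Int.floordiv (lo + hi) 2 < hi := by
  constructor
  · rw [PySem.Int.le_floordiv_iff_mul_le (by omega)]; omega
  · rw [PySem.Int.floordiv_lt_iff_lt_mul (by omega)]; omega

-- pref = [0]; for m in p: pref.append(pref[-1] + (1 if 1 - m else 0))
-- pref[-1] is always in range (the accumulator starts nonempty and only grows), so getD never supplies its default.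
def buildPref (p : List Int) : List Int :=
  p.foldl (fun pref m =>
    pref ++ [(PySem.List.pyGet? pref (-1)).getD 0 + (if 1 - m ≠ 0 then 1 else 0)]) [0]

-- while lo < hi: mid = (lo+hi)//2; if pref[mid+1] > seed: hi = mid else lo = mid+1
-- pref[mid+1] is always in range on the inputs the caller reaches (1 ≤ mid+1 ≤ len(p) < len(pref)), so getD never supplies its default.
def bsLoop (pref : List Int) (seed lo hi : Int) : Int :=
  if h : lo < hi then
    let mid := PySem.Int.floordiv (lo + hi) 2
    if (PySem.List.pyGet? pref (mid + 1)).getD 0 > seed then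
      bsLoop pref seed lo mid
    else
      bsLoop pref seed (mid + 1) hi
  else lo
termination_by (hi - lo).toNat
decreasing_by
  · have := pv_mid_bounds h; omega
  · have := pv_mid_bounds h; omega

def find_origin_id_alt (p : List Int) (seed_id : Int) : Option Int :=
  if seed_id < 0 then none
  else if (PySem.List.pyGet? (buildPref p) (-1)).getD 0 ≤ seed_id then none
  else some (bsLoop (buildPref p) seed_id 0 ((p.length : Int) - 1))

-- ===== PRECONDITION & SPEC =====
def Spec_find_origin_id (p : List Int) (seed_id : Int) (out : Option Int) : Prop := out = find_origin_id_alt p seed_id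
instance (p : List Int) (seed_id : Int) (out : Option Int) : Decidable (Spec_find_origin_id p seed_id out) := by unfold Spec_find_origin_id; infer_instance

-- ===== CLAIM (what is proved, stated in full; the proofs are below) =====
def Claim_equal_find_origin_id : Prop := ∀ (p : List Int) (seed_id : Int), Dom_find_origin_id p seed_id → Spec_find_origin_id p seed_id (find_origin_id p seed_id)

-- ===== LEMMAS AND PROOFS =====

-- the present-index list of a pair list (proof-side view of A's scan)
def presF (l : List (Int × Int)) : List Int :=
  l.filterMap (fun im => if 1 - im.2 ≠ 0 then some im.1 else none)

-- A's scan over any pair list computes a guarded positional lookup into the filtered index list.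
theorem find_origin_id_loop_eq (l : List (Int × Int)) :
    ∀ (cnt seed : Int),
      find_origin_id_loop l cnt seed =
        if cnt ≤ seed ∧ (seed - cnt).toNat < (presF l).length then
          (presF l)[(seed - cnt).toNat]? else none := by
  induction l with
  | nil =>
    intro cnt seed
    simp [find_origin_id_loop, presF]
  | cons hd tl ih =>
    intro cnt seed
    obtain ⟨i, m⟩ := hd
    by_cases hm : (1 : Int) - m = 0
    · rw [show find_origin_id_loop ((i, m) :: tl) cnt seed = find_origin_id_loop tl cnt seed
            from by simp [find_origin_id_loop, hm],
          show presF ((i, m) :: tl) = presF tl from by simp [presF, hm]]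
      exact ih cnt seed
    · have hp : presF ((i, m) :: tl) = i :: presF tl := by simp [presF, hm]
      have hl : find_origin_id_loop ((i, m) :: tl) cnt seed =
          if cnt = seed then some i else find_origin_id_loop tl (cnt + 1) seed := by
        simp [find_origin_id_loop, hm]
      rw [hl, hp]
      by_cases hc : cnt = seed
      · subst hc
        have h0 : (cnt - cnt).toNat = 0 := by omega
        rw [if_pos rfl, if_pos ⟨le_refl _, by rw [h0]; simp⟩, h0]
        simp
      · rw [if_neg hc, ih (cnt + 1) seed]
        by_cases h2 : cnt + 1 ≤ seed ∧ (seed - (cnt + 1)).toNat < (presF tl).length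
        · have h3 : (seed - cnt).toNat = (seed - (cnt + 1)).toNat + 1 := by omega
          rw [if_pos h2, if_pos ⟨by omega, by
                rw [h3, List.length_cons]; exact Nat.succ_lt_succ h2.2⟩, h3]
          simp
        · rw [if_neg h2, if_neg (by
            rintro ⟨ha, hb⟩
            rw [List.length_cons] at hb
            exact h2 ⟨by omega, by omega⟩)]

-- number of present entries
def cpN (l : List Int) : Nat := (l.filter (fun m => decide ((1:Int) - m ≠ 0))).length

-- indices (0-based) of present entries
def presIdxN : List Int → List Nat
  | [] => []
  | m :: r => if (1:Int) - m ≠ 0 then 0 :: (presIdxN r).map (· + 1) else (presIdxN r).map (· + 1)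

theorem cpN_nil : cpN [] = 0 := rfl

theorem cpN_cons (m : Int) (l : List Int) :
    cpN (m :: l) = (if (1:Int) - m ≠ 0 then 1 else 0) + cpN l := by
  by_cases h : (1:Int) - m ≠ 0
  · simp [cpN, h]; omega
  · simp [cpN, h]

theorem presF_enumerate (p : List Int) :
    ∀ (k : Int), presF (PySem.List.enumerate p k) = (presIdxN p).map (fun j : Nat => k + (j : Int)) := by
  induction p with
  | nil => intro k; simp [presF, presIdxN, PySem.List.enumerate]
  | cons m r ih =>
    intro k
    rw [PySem.List.enumerate_cons]
    by_cases h : (1:Int) - m ≠ 0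
    · have hstep : presF ((k, m) :: PySem.List.enumerate r (k + 1)) = k :: presF (PySem.List.enumerate r (k + 1)) := by
        simp [presF, h]
      rw [hstep, ih (k + 1), presIdxN, if_pos h, List.map_cons, List.map_map]
      congr 1
      · simp
      · apply List.map_congr_left; intro j _; simp [Function.comp]; push_cast; ring
    · have hstep : presF ((k, m) :: PySem.List.enumerate r (k + 1)) = presF (PySem.List.enumerate r (k + 1)) := by
        simp [presF, h]
      rw [hstep, ih (k + 1), presIdxN, if_neg h, List.map_map]
      apply List.map_congr_left; intro j _; simp [Function.comp]; push_cast; ring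

theorem length_presIdxN (p : List Int) : (presIdxN p).length = cpN p := by
  induction p with
  | nil => rfl
  | cons m r ih =>
    rw [presIdxN, cpN_cons]
    by_cases h : (1:Int) - m ≠ 0 <;> simp [h, ih] <;> omega

theorem presIdxN_get :
    ∀ (p : List Int) (s j : Nat), (presIdxN p)[s]? = some j →
      j < p.length ∧ cpN (p.take j) = s ∧ cpN (p.take (j + 1)) = s + 1 := by
  intro p
  induction p with
  | nil => intro s j h; simp [presIdxN] at h
  | cons m r ih =>
    intro s j h
    by_cases hm : (1:Int) - m ≠ 0
    · rw [presIdxN, if_pos hm] at h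
      cases s with
      | zero =>
        simp at h
        subst h
        refine ⟨by simp, by simp [cpN], ?_⟩
        simp [List.take_succ_cons, cpN_cons, if_pos hm, cpN_nil]
      | succ s' =>
        rw [List.getElem?_cons_succ, List.getElem?_map] at h
        cases hg : (presIdxN r)[s']? with
        | none => rw [hg] at h; simp at h
        | some j' =>
          rw [hg] at h; simp at h
          obtain ⟨hjl, ht, ht1⟩ := ih s' j' hg
          subst h
          refine ⟨by simpa using hjl, ?_, ?_⟩
          · rw [List.take_succ_cons, cpN_cons, if_pos hm, ht]; omega
          · rw [List.take_succ_cons, cpN_cons, if_pos hm, ht1]; omega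
    · rw [presIdxN, if_neg hm, List.getElem?_map] at h
      cases hg : (presIdxN r)[s]? with
      | none => rw [hg] at h; simp at h
      | some j' =>
        rw [hg] at h; simp at h
        obtain ⟨hjl, ht, ht1⟩ := ih s j' hg
        subst h
        refine ⟨by simpa using hjl, ?_, ?_⟩
        · rw [List.take_succ_cons, cpN_cons, if_neg hm, ht]; simp
        · rw [List.take_succ_cons, cpN_cons, if_neg hm, ht1]; simp

theorem cpN_take_mono (l : List Int) {a b : Nat} (h : a ≤ b) :
    cpN (l.take a) ≤ cpN (l.take b) := by
  calc cpN (l.take a) = cpN ((l.take b).take a) := by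
        rw [List.take_take, Nat.min_eq_left h]
    _ ≤ cpN (l.take b) := ((List.take_sublist _ _).filter _).length_le

theorem cpN_le_length (l : List Int) : cpN l ≤ l.length := List.length_filter_le _ _

theorem buildPref_go :
    ∀ (p : List Int) (acc : List Int) (c : Int), acc.getLast? = some c →
      p.foldl (fun pref m =>
        pref ++ [(PySem.List.pyGet? pref (-1)).getD 0 + (if (1:Int) - m ≠ 0 then 1 else 0)]) acc
        = acc ++ (List.range p.length).map (fun i => c + (cpN (p.take (i + 1)) : Int)) := by
  intro p
  induction p with
  | nil => intro acc c _; simp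
  | cons m r ih =>
    intro acc c hc
    have hlast : (PySem.List.pyGet? acc (-1)).getD 0 = c := by
      rw [PySem.List.pyGet?_neg_one, hc]; rfl
    set δ : Int := if (1:Int) - m ≠ 0 then 1 else 0 with hδ
    have hδn : (cpN [m] : Int) = δ := by
      by_cases h : (1:Int) - m ≠ 0 <;> simp [cpN, h, hδ]
    rw [List.foldl_cons, hlast,
        ih (acc ++ [c + δ]) (c + δ) (by simp)]
    rw [List.append_assoc]
    congr 1
    rw [List.length_cons, List.range_succ_eq_map, List.map_cons, List.map_map,
        List.singleton_append]
    congr 1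
    · rw [show (m :: r).take (0 + 1) = [m] from rfl, hδn]
    · apply List.map_congr_left
      intro i _
      simp only [Function.comp]
      rw [show (m :: r).take (Nat.succ i + 1) = m :: r.take (i + 1) from rfl, cpN_cons]
      by_cases h : (1:Int) - m ≠ 0 <;> simp [h, hδ] <;> push_cast <;> ring

theorem buildPref_eq (p : List Int) :
    buildPref p = 0 :: (List.range p.length).map (fun i => (cpN (p.take (i + 1)) : Int)) := by
  unfold buildPref
  rw [buildPref_go p [0] 0 rfl]
  simp

theorem buildPref_get (p : List Int) (i : Nat) (h : i ≤ p.length) :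
    (buildPref p)[i]? = some ((cpN (p.take i) : Int)) := by
  rw [buildPref_eq]
  cases i with
  | zero => simp [cpN]
  | succ n =>
    rw [List.getElem?_cons_succ, List.getElem?_map, List.getElem?_range (by omega)]
    rfl

theorem g_eval (p : List Int) (x : Int) (h0 : 0 ≤ x) (h1 : x ≤ (p.length : Int)) :
    (PySem.List.pyGet? (buildPref p) x).getD 0 = (cpN (p.take x.toNat) : Int) := by
  rw [PySem.List.pyGet?_of_nonneg _ h0, buildPref_get p x.toNat (by omega)]
  rfl

theorem buildPref_last (p : List Int) :
    (PySem.List.pyGet? (buildPref p) (-1)).getD 0 = (cpN p : Int) := by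
  rw [PySem.List.pyGet?_neg_one, buildPref_eq]
  cases hn : p.length with
  | zero =>
    have : p = [] := List.length_eq_zero_iff.mp hn
    subst this; rfl
  | succ k =>
    rw [List.getLast?_eq_getElem?]
    simp only [List.length_cons, List.length_map, List.length_range, hn]
    rw [show k + 1 + 1 - 1 = k + 1 from rfl, List.getElem?_cons_succ, List.getElem?_map,
        List.getElem?_range (by omega)]
    simp only [Option.map_some, Option.getD_some]
    rw [show k + 1 = p.length from hn.symm, List.take_length]

theorem bsLoop_eq (pref : List Int) (s : Int) :
    ∀ (n : Nat) (lo hi j : Int), (hi - lo).toNat ≤ n → lo ≤ j → j ≤ hi →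
      (∀ x : Int, lo ≤ x → x < j → (PySem.List.pyGet? pref (x + 1)).getD 0 ≤ s) →
      (∀ x y : Int, lo ≤ x → x ≤ y → y ≤ hi →
        (PySem.List.pyGet? pref (x + 1)).getD 0 ≤ (PySem.List.pyGet? pref (y + 1)).getD 0) →
      s < (PySem.List.pyGet? pref (j + 1)).getD 0 →
      bsLoop pref s lo hi = j := by
  intro n
  induction n with
  | zero =>
    intro lo hi j hn h1 h2 _ _ _
    rw [bsLoop, dif_neg (by omega)]
    omega
  | succ n ih =>
    intro lo hi j hn h1 h2 hlow hmono hj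
    rw [bsLoop]
    by_cases hlh : lo < hi
    · rw [dif_pos hlh]
      obtain ⟨hm1, hm2⟩ := pv_mid_bounds hlh
      set mid := PySem.Int.floordiv (lo + hi) 2 with hmid
      by_cases hc : (PySem.List.pyGet? pref (mid + 1)).getD 0 > s
      · rw [if_pos hc]
        have hjm : j ≤ mid := by
          by_contra hnot
          push_neg at hnot
          have := hlow mid hm1 hnot
          omega
        exact ih lo mid j (by omega) h1 hjm hlow
          (fun x y hx hxy hy => hmono x y hx hxy (by omega)) hj
      · rw [if_neg hc]
        push_neg at hc
        have hjm : mid < j := by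
          by_contra hnot
          push_neg at hnot
          have := hmono j mid h1 hnot (by omega)
          omega
        exact ih (mid + 1) hi j (by omega) (by omega) h2
          (fun x hx hxj => hlow x (by omega) hxj)
          (fun x y hx hxy hy => hmono x y (by omega) hxy hy) hj
    · rw [dif_neg hlh]
      omega

-- ===== VERDICT (by name: the statement is the Claim_ definition above) =====
theorem find_origin_id_spec : Claim_equal_find_origin_id := by
  intro p s _
  unfold Spec_find_origin_id find_origin_id find_origin_id_alt
  rw [find_origin_id_loop_eq]
  simp only [sub_zero]
  have hpres : presF (PySem.List.enumerate p 0) = (presIdxN p).map (fun j : Nat => (j : Int)) := by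
    rw [presF_enumerate]; simp
  have hlen : (presF (PySem.List.enumerate p 0)).length = cpN p := by
    rw [hpres, List.length_map, length_presIdxN]
  by_cases hneg : s < 0
  · rw [if_pos hneg, if_neg (by rintro ⟨h1, _⟩; omega)]
  · rw [if_neg hneg]
    push_neg at hneg
    have hlast := buildPref_last p
    by_cases hbig : (cpN p : Int) ≤ s
    · rw [if_neg (show ¬(0 ≤ s ∧ s.toNat < (presF (PySem.List.enumerate p 0)).length) from
            by rintro ⟨_, h2⟩; rw [hlen] at h2; omega),
          if_pos (show (PySem.List.pyGet? (buildPref p) (-1)).getD 0 ≤ s from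
            by rw [hlast]; exact hbig)]
    · push_neg at hbig
      have hsn : s.toNat < (presIdxN p).length := by rw [length_presIdxN]; omega
      have hget : (presIdxN p)[s.toNat]? = some (presIdxN p)[s.toNat] := List.getElem?_eq_getElem hsn
      set jn : Nat := (presIdxN p)[s.toNat] with hjn
      obtain ⟨hjlen, htake, htake1⟩ := presIdxN_get p s.toNat jn hget
      have hcplen : cpN p ≤ p.length := cpN_le_length p
      rw [if_pos (show 0 ≤ s ∧ s.toNat < (presF (PySem.List.enumerate p 0)).length from
            ⟨hneg, by rw [hlen]; omega⟩),
          if_neg (show ¬(PySem.List.pyGet? (buildPref p) (-1)).getD 0 ≤ s from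
            by rw [hlast]; omega),
          hpres, List.getElem?_map, hget]
      simp only [Option.map_some]
      congr 1
      refine (bsLoop_eq (buildPref p) s ((p.length : Int) - 1 - 0).toNat 0 ((p.length : Int) - 1)
        (jn : Int) (le_refl _) (by omega) (by omega) ?_ ?_ ?_).symm
      · intro x hx hxj
        rw [g_eval p (x + 1) (by omega) (by omega)]
        have hmle : (x + 1).toNat ≤ jn := by omega
        have := le_trans (cpN_take_mono p hmle) (le_of_eq htake)
        omega
      · intro x y hx hxy hy
        rw [g_eval p (x + 1) (by omega) (by omega), g_eval p (y + 1) (by omega) (by omega)]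
        have : (x + 1).toNat ≤ (y + 1).toNat := by omega
        have := cpN_take_mono p this
        omega
      · rw [g_eval p ((jn : Int) + 1) (by omega) (by omega)]
        have : ((jn : Int) + 1).toNat = jn + 1 := by omega
        rw [this, htake1]
        omega
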